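-- pv_equiv track=rewrite | github.com/ty-hayes-82/simulation | golfsim/postprocessing/golfer_colors.py | _color_for_wait_time
-- ===== SOURCE A (Python) =====
-- from typing import Any, Dict, List, Optional, Tuple
--
-- WAITING_SHADES: List[Tuple[int, str]] = [
--     (0, "#ffe6cc"),    # 0-10 min
--     (10, "#ffcc99"),   # 10-20 min
--     (20, "#ffb366"),   # 20-30 min
--     (30, "#ff9933"),   # 30-40 min
--     (40, "#ff6600"),   # 40-50 min
--     (50, "#ff0000"),   # 50-60+ min (approaching red -> red)
-- ]
--
-- SIXTY_MIN_S = 60 * 60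
--
-- def _color_for_wait_time(seconds_since_order: int) -> str:
--     # Once at or past 60 minutes, hard red
--     if seconds_since_order >= SIXTY_MIN_S:
--         return "#ff0000"
--     minutes = max(0, seconds_since_order // 60)
--     shade = WAITING_SHADES[0][1]
--     for threshold_min, color in WAITING_SHADES:
--         if minutes >= threshold_min:
--             shade = color
--         else:
--             break
--     return shade
-- ===== SOURCE B (Python) =====
-- from typing import List, Tuple
--
-- WAITING_SHADES: List[Tuple[int, str]] = [
--     (0, "#ffe6cc"),
--     (10, "#ffcc99"),
--     (20, "#ffb366"),
--     (30, "#ff9933"),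
--     (40, "#ff6600"),
--     (50, "#ff0000"),
-- ]
--
-- def _color_for_wait_time(seconds_since_order: int) -> str:
--     # Direct arithmetic bucket: each 10-minute decile is one shade, clamped at red.
--     minutes = max(0, seconds_since_order // 60)
--     return WAITING_SHADES[min(minutes // 10, 5)][1]
-- ===== Notes on version B (the rewrite author's own statement) =====
-- stated objective: simpler
-- what changed: Replaces the threshold-scanning loop and its hard-red early-return guard by a single arithmetic bucket index (the clamped decile of the minute count) into the shade table.
import Mathlib
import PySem

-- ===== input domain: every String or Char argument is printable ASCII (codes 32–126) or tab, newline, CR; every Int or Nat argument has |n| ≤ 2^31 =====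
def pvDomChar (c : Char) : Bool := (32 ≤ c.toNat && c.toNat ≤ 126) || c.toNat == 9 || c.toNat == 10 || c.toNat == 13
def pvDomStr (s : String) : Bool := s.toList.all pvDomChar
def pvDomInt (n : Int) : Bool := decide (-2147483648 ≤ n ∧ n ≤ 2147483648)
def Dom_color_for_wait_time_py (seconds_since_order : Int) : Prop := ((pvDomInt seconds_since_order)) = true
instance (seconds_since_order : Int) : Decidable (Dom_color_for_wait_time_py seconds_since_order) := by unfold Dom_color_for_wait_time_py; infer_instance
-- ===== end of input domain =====

-- B replaces A's threshold-scanning loop (and its >=60-minute early return) by a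
-- direct arithmetic bucket index min(minutes//10, 5) into the shade table; objective: simpler.

-- ===== PORT A =====
-- WAITING_SHADES
def pvShades : List (Int × String) :=
  [(0, "#ffe6cc"), (10, "#ffcc99"), (20, "#ffb366"),
   (30, "#ff9933"), (40, "#ff6600"), (50, "#ff0000")]

-- the 'for threshold_min, color in WAITING_SHADES' loop with its break
def pvLoopA (minutes : Int) (shade : String) : List (Int × String) → String
  | [] => shade
  | (t, c) :: rest => if minutes ≥ t then pvLoopA minutes c rest else shade

def color_for_wait_time_py (seconds_since_order : Int) : String :=
  if seconds_since_order ≥ 3600 then "#ff0000"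
  else
    let minutes := max 0 (PySem.Int.floordiv seconds_since_order 60)
    -- shade = WAITING_SHADES[0][1]
    pvLoopA minutes "#ffe6cc" pvShades

-- ===== PORT B =====
def color_for_wait_time_py_alt (seconds_since_order : Int) : String :=
  let minutes := max 0 (PySem.Int.floordiv seconds_since_order 60)
  -- WAITING_SHADES[min(minutes // 10, 5)][1]; the index is always in range, none is unreachable
  match PySem.List.pyGet? pvShades (min (PySem.Int.floordiv minutes 10) 5) with
  | some (_, c) => c
  | none => ""

-- ===== PRECONDITION & SPEC =====
def Spec_color_for_wait_time_py (seconds_since_order : Int) (out : String) : Prop := out = color_for_wait_time_py_alt seconds_since_order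
instance (seconds_since_order : Int) (out : String) : Decidable (Spec_color_for_wait_time_py seconds_since_order out) := by unfold Spec_color_for_wait_time_py; infer_instance

-- ===== CLAIM (what is proved, stated in full; the proofs are below) =====
def Claim_equal_color_for_wait_time_py : Prop := ∀ (seconds_since_order : Int), Dom_color_for_wait_time_py seconds_since_order → Spec_color_for_wait_time_py seconds_since_order (color_for_wait_time_py seconds_since_order)

-- ===== LEMMAS AND PROOFS =====

-- both programs depend on the input only through minutes = max 0 (s // 60); for
-- minutes in [0, 60) the two closed computations agree (checked case by case)
theorem pv_buckets_agree (m : Int) (h0 : 0 ≤ m) (h1 : m < 60) :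
    pvLoopA m "#ffe6cc" pvShades =
      (match PySem.List.pyGet? pvShades (min (PySem.Int.floordiv m 10) 5) with
       | some (_, c) => c
       | none => "") := by
  interval_cases m <;> decide

theorem pv_agree (s : Int) :
    color_for_wait_time_py s = color_for_wait_time_py_alt s := by
  unfold color_for_wait_time_py color_for_wait_time_py_alt
  by_cases h : s ≥ 3600
  · -- minutes ≥ 60, so the index clamps to 5 and B returns the red shade too
    have h60 : (60 : Int) ≤ PySem.Int.floordiv s 60 :=
      (PySem.Int.le_floordiv_iff_mul_le (by norm_num)).mpr (by omega)
    have hm : max 0 (PySem.Int.floordiv s 60) = PySem.Int.floordiv s 60 := by omega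
    have h6 : (6 : Int) ≤ PySem.Int.floordiv (PySem.Int.floordiv s 60) 10 :=
      (PySem.Int.le_floordiv_iff_mul_le (by norm_num)).mpr (by omega)
    have hmin : min (PySem.Int.floordiv (PySem.Int.floordiv s 60) 10) 5 = 5 := by omega
    simp only [h, if_pos, hm, hmin]
    decide
  · have hlt : PySem.Int.floordiv s 60 < 60 :=
      (PySem.Int.floordiv_lt_iff_lt_mul (by norm_num)).mpr (by omega)
    simp only [h, if_neg, not_false_iff]
    exact pv_buckets_agree _ (le_max_left _ _) (by omega)

-- ===== VERDICT (by name: the statement is the Claim_ definition above) =====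
theorem color_for_wait_time_py_spec : Claim_equal_color_for_wait_time_py := by
  intro s _
  unfold Spec_color_for_wait_time_py
  exact pv_agree s
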